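-- pv_equiv track=rewrite | github.com/efecankuloglu/questions | 5.py | noNoneValueList
-- ===== SOURCE A (Python) =====
-- def noNoneValueList(lt):
--     new_lt = []
--     for i in range(0, len(lt)):
--         if lt[i] is None:
--             for j in range(i - 1, -1, -1):
--                 if lt[j] is not None:
--                     new_lt.append(lt[j])
--                     break
--         else:
--             new_lt.append(lt[i])
--     return new_lt
-- ===== SOURCE B (Python) =====
-- def noNoneValueList(lt):
--     out = []
--     last = None
--     for x in lt:
--         if x is not None:
--             last = x
--         if last is not None:
--             out.append(last)
--     return out
-- ===== Notes on version B (the rewrite author's own statement) =====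
-- stated objective: simpler
-- what changed: Replaced the per-None backward rescan of the prefix with a single forward pass that tracks the last non-None value seen.
import Mathlib
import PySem

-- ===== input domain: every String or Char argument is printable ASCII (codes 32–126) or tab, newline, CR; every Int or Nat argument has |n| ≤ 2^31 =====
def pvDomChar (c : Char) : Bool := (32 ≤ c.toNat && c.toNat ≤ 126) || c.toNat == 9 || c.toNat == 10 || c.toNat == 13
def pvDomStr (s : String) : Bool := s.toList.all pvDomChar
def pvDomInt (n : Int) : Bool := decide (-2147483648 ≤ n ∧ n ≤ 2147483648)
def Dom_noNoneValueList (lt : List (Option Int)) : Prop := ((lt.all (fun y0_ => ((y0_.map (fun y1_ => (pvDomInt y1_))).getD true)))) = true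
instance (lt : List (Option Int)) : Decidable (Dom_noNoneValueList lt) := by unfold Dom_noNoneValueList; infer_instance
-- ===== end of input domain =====

-- B replaces A's per-None backward rescan of the prefix by one forward pass tracking the last non-None value (objective: simpler; intended as faster, measured 1.44x at the largest size, below the 1.5x confirmation bar).

-- ===== PORT A =====
-- inner loop 'for j in range(i-1,-1,-1): if lt[j] is not None: append(lt[j]); break'
-- as the obvious count-down recursion with break = early return
def backScan (lt : List (Option Int)) (j : Int) : Option Int :=
  if h : 0 ≤ j then
    match PySem.List.pyGetD lt j none with
    | some v => some v
    | none => backScan lt (j - 1)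
  else none
termination_by (j + 1).toNat
decreasing_by omega

def noNoneValueList (lt : List (Option Int)) : List Int :=
  (PySem.List.pyRange 0 lt.length 1).foldl (fun new_lt i =>
    match PySem.List.pyGetD lt i none with
    | none =>
      match backScan lt (i - 1) with
      | some v => new_lt ++ [v]
      | none => new_lt
    | some x => new_lt ++ [x]) []

-- ===== PORT B =====
-- single pass: 'last' is the last non-None value seen so far
def altGo (last : Option Int) (lt : List (Option Int)) : List Int :=
  match lt with
  | [] => []
  | x :: rest =>
    let last' := if x.isSome then x else last
    match last' with
    | some v => v :: altGo last' rest
    | none => altGo last' rest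

def noNoneValueList_alt (lt : List (Option Int)) : List Int :=
  altGo none lt

-- ===== PRECONDITION & SPEC =====
def Spec_noNoneValueList (lt : List (Option Int)) (out : List Int) : Prop := out = noNoneValueList_alt lt
instance (lt : List (Option Int)) (out : List Int) : Decidable (Spec_noNoneValueList lt out) := by unfold Spec_noNoneValueList; infer_instance

-- ===== CLAIM (what is proved, stated in full; the proofs are below) =====
def Claim_equal_noNoneValueList : Prop := ∀ (lt : List (Option Int)), Dom_noNoneValueList lt → Spec_noNoneValueList lt (noNoneValueList lt)

-- ===== LEMMAS AND PROOFS =====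

/-- last non-None value of a list (the state B carries). -/
def lastNonNone (l : List (Option Int)) : Option Int :=
  l.foldl (fun acc o => match o with | some v => some v | none => acc) none

theorem lastNonNone_append_singleton (p : List (Option Int)) (x : Option Int) :
    lastNonNone (p ++ [x]) = match x with | some v => some v | none => lastNonNone p := by
  simp [lastNonNone, List.foldl_append]

theorem backScan_eq (pre rest : List (Option Int)) :
    backScan (pre ++ rest) ((pre.length : Int) - 1) = lastNonNone pre := by
  induction pre using List.reverseRecOn generalizing rest with
  | nil => unfold backScan; norm_num [lastNonNone]
  | append_singleton p x ih =>
    unfold backScan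
    have hlen : ((p ++ [x]).length : Int) - 1 = (p.length : Int) := by simp
    rw [hlen]
    have hget : PySem.List.pyGetD ((p ++ [x]) ++ rest) ((p.length : Int)) none = x := by
      rw [PySem.List.pyGetD_natCast]
      simp [List.getD, List.getElem?_append_left, List.getElem?_append_right]
    simp only [Int.le_refl, Int.natCast_nonneg, dif_pos, hget]
    cases x with
    | some v => simp [lastNonNone_append_singleton]
    | none =>
      rw [lastNonNone_append_singleton]
      have h2 : (p ++ [(none : Option Int)]) ++ rest = p ++ ((none : Option Int) :: rest) := by simp
      rw [h2]
      exact ih ((none : Option Int) :: rest)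

theorem getD_append_cons (pre rest : List (Option Int)) (s : Option Int) :
    (pre ++ s :: rest).getD pre.length none = s := by
  simp [List.getD, List.getElem?_append_right]

theorem main_suffix (suf : List (Option Int)) :
    ∀ (pre : List (Option Int)) (acc : List Int),
      (PySem.List.pyRange (pre.length : Int) ((pre.length : Int) + suf.length) 1).foldl
        (fun new_lt i =>
          match PySem.List.pyGetD (pre ++ suf) i none with
          | none =>
            match backScan (pre ++ suf) (i - 1) with
            | some v => new_lt ++ [v]
            | none => new_lt
          | some x => new_lt ++ [x]) acc
      = acc ++ altGo (lastNonNone pre) suf := by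
  induction suf with
  | nil =>
    intro pre acc
    simp [PySem.List.pyRange_one_eq_nil, altGo]
  | cons s rest ih =>
    intro pre acc
    have hcons : PySem.List.pyRange (pre.length : Int) ((pre.length : Int) + (s :: rest).length) 1
        = (pre.length : Int) :: PySem.List.pyRange ((pre.length : Int) + 1) ((pre.length : Int) + (s :: rest).length) 1 :=
      PySem.List.pyRange_one_cons (by simp only [List.length_cons]; push_cast; omega)
    rw [hcons]
    simp only [List.foldl_cons]
    have hget : PySem.List.pyGetD (pre ++ s :: rest) ((pre.length : Int)) none = s := by
      rw [PySem.List.pyGetD_natCast]; exact getD_append_cons pre rest s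
    have hback : backScan (pre ++ s :: rest) ((pre.length : Int) - 1) = lastNonNone pre :=
      backScan_eq pre (s :: rest)
    have hsplit : pre ++ s :: rest = (pre ++ [s]) ++ rest := by simp
    have hIH := ih (pre ++ [s])
    have hlen' : (((pre ++ [s]).length : Int)) = (pre.length : Int) + 1 := by simp
    have hlen'' : ((pre.length : Int) + 1) + (rest.length : Int) = (pre.length : Int) + ((s :: rest).length : Int) := by
      simp only [List.length_cons]
      push_cast
      omega
    cases s with
    | some x =>
      rw [hget, hback]
      have := hIH (acc ++ [x])
      rw [hlen', ← hsplit, hlen''] at this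
      simpa [altGo, lastNonNone_append_singleton] using this
    | none =>
      rw [hget, hback]
      rw [lastNonNone_append_singleton (x := none)] at hIH
      cases hlast : lastNonNone pre with
      | some v =>
        have := hIH (acc ++ [v])
        rw [hlen', ← hsplit, hlen'', hlast] at this
        simpa [altGo, hlast] using this
      | none =>
        have := hIH acc
        rw [hlen', ← hsplit, hlen'', hlast] at this
        simpa [altGo, hlast] using this

-- ===== VERDICT (by name: the statement is the Claim_ definition above) =====
theorem noNoneValueList_spec : Claim_equal_noNoneValueList := by
  intro lt _
  unfold Spec_noNoneValueList noNoneValueList noNoneValueList_alt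
  have := main_suffix lt [] []
  simpa [lastNonNone] using this
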